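-- pv_equiv track=rewrite | github.com/ngshya/kbgit | kbgit/kb/block.py | fixed_length_list
-- ===== SOURCE A (Python) =====
-- from typing import Dict, List, Union, Any, Self
--
-- def fixed_length_list(
--         list_strings: List[str],
--         l: int=100,
--         additional_space: int=4
--     ) -> List[str]:
--     """
--     Adjust a list of strings to ensure fixed length output.
--
--     This function processes a list of strings, ensuring that each string
--     fits within a specified length. If a string exceeds this length,
--     it will be split, and leading white space will be accounted for.
--     If the total space (initial whitespace plus additional space)
--     results in a string that cannot fit, an ellipsis ("[...]") is appended
--     to the list.
--
--     Args:
--         list_strings (list): A list of strings to be processed.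
--         l (int, optional): The maximum length for each string.
--             Defaults to 100.
--         additional_space (int, optional): The additional spaces to
--             prepend for formatting. Defaults to 4.
--
--     Returns:
--         list: A new list containing the adjusted strings, each fitting
--             within the specified length. If a string exceeds the maximum
--             length and cannot be adjusted, it adds "[...]".
--     """
--     new_list = []
--     for _, row in enumerate(list_strings):
--         initial_white_space = len(row) - len(row.lstrip())
--         total_space = (initial_white_space + additional_space) * " "
--         if len(total_space) >= l-20:
--             new_list.append("[...]")
--             break
--         tmp = row
--         while len(tmp) > l:
--             new_list.append(tmp[:l])
--             if _ > 0:
--                 tmp =  total_space + tmp[l:]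
--             else:
--                 tmp = tmp[l:]
--         new_list.append(tmp)
--     return new_list
-- ===== SOURCE B (Python) =====
-- def fixed_length_list(
--         list_strings,
--         l: int = 100,
--         additional_space: int = 4
--     ):
--     """Index-pointer chunking: walk each string once with a cursor instead of
--     rebuilding the shrinking suffix on every iteration."""
--     out = []
--     for i, row in enumerate(list_strings):
--         ws = len(row) - len(row.lstrip())
--         p = max(ws + additional_space, 0)
--         if p >= l - 20:
--             out.append("[...]")
--             break
--         if len(row) <= l:
--             out.append(row)
--             continue
--         out.append(row[:l])
--         if i == 0:
--             j = l
--             while len(row) - j > l: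
--                 out.append(row[j:j + l])
--                 j += l
--             out.append(row[j:])
--         else:
--             pre = " " * p
--             step = l - p
--             j = l
--             while p + (len(row) - j) > l:
--                 out.append(pre + row[j:j + step])
--                 j += step
--             out.append(pre + row[j:])
--     return out
-- ===== Notes on version B (the rewrite author's own statement) =====
-- stated objective: alternative
-- what changed: Replaces A's loop that rebuilds the whole shrinking suffix each iteration (tmp = total_space + tmp[l:]) with a single index pointer walking each string once, copying only each emitted chunk.
import Mathlib
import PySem

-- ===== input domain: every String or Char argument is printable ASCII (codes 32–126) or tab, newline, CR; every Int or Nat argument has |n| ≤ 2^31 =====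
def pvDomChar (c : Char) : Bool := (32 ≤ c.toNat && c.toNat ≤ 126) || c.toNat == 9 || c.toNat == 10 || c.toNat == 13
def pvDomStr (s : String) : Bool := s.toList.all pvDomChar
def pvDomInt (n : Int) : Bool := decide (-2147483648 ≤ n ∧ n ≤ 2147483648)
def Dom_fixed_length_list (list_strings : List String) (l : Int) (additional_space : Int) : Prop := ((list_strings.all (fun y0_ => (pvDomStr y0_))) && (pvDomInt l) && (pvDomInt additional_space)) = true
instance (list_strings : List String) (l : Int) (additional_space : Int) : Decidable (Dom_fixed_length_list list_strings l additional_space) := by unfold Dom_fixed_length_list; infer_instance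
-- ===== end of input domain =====

-- B chunks each string with an index pointer instead of A's repeated rebuilding of the shrinking suffix; proved to return the same list on all inputs.

-- ===== PORT A =====
-- the `while len(tmp) > l` loop; fuel (tmp's initial length) only makes the
-- recursion total — in every state Python reaches, the fuel is sufficient.
def pvAWhile (l : Int) (idx : Nat) (pre : List Char) : Nat → List Char → List (List Char)
  | 0, tmp => [tmp]
  | f+1, tmp =>
    if l < (tmp.length : Int) then
      (PySem.List.slice tmp none (some l)) ::
        pvAWhile l idx pre f
          (if 0 < idx then pre ++ PySem.List.slice tmp (some l) none
           else PySem.List.slice tmp (some l) none)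
    else [tmp]

-- the `for _, row in enumerate(list_strings)` loop; `break` returns at once.
def pvAGo (l : Int) (additional_space : Int) : Nat → List String → List String
  | _, [] => []
  | idx, row :: rest =>
    let initial_white_space : Int :=
      (row.toList.length : Int) - ((PySem.Chars.lstrip row.toList).length : Int)
    -- " " * n with possibly negative n: empty for n ≤ 0, exactly Python
    let total_space : List Char := List.replicate (initial_white_space + additional_space).toNat ' '
    if l - 20 ≤ (total_space.length : Int) then ["[...]"]
    else
      (pvAWhile l idx total_space row.toList.length row.toList).map (fun cs => String.ofList cs)
        ++ pvAGo l additional_space (idx + 1) rest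

def fixed_length_list (list_strings : List String) (l : Int) (additional_space : Int) : List String :=
  pvAGo l additional_space 0 list_strings

-- ===== PORT B =====
-- first-row pointer loop: `while len(row) - j > l`
def pvBFirst (l : Int) (row : List Char) : Nat → Int → List (List Char)
  | 0, j => [PySem.List.slice row (some j) none]
  | f+1, j =>
    if l < (row.length : Int) - j then
      (PySem.List.slice row (some j) (some (j + l))) :: pvBFirst l row f (j + l)
    else [PySem.List.slice row (some j) none]

-- later-row pointer loop: `while p + (len(row) - j) > l`
def pvBRest (l p : Int) (pre row : List Char) : Nat → Int → List (List Char)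
  | 0, j => [pre ++ PySem.List.slice row (some j) none]
  | f+1, j =>
    if l < p + ((row.length : Int) - j) then
      (pre ++ PySem.List.slice row (some j) (some (j + (l - p)))) ::
        pvBRest l p pre row f (j + (l - p))
    else [pre ++ PySem.List.slice row (some j) none]

def pvBGo (l : Int) (additional_space : Int) : Nat → List String → List String
  | _, [] => []
  | i, row :: rest =>
    let cs := row.toList
    let ws : Int := (cs.length : Int) - ((PySem.Chars.lstrip cs).length : Int)
    let p : Int := max (ws + additional_space) 0
    if l - 20 ≤ p then ["[...]"]
    else if (cs.length : Int) ≤ l then row :: pvBGo l additional_space (i + 1) rest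
    else
      String.ofList (PySem.List.slice cs none (some l)) ::
        ((if i = 0 then pvBFirst l cs cs.length l
          else pvBRest l p (List.replicate p.toNat ' ') cs cs.length l).map
          (fun t => String.ofList t))
        ++ pvBGo l additional_space (i + 1) rest

def fixed_length_list_alt (list_strings : List String) (l : Int) (additional_space : Int) : List String :=
  pvBGo l additional_space 0 list_strings

-- ===== PRECONDITION & SPEC =====
def Spec_fixed_length_list (list_strings : List String) (l : Int) (additional_space : Int) (out : List String) : Prop := out = fixed_length_list_alt list_strings l additional_space
instance (list_strings : List String) (l : Int) (additional_space : Int) (out : List String) : Decidable (Spec_fixed_length_list list_strings l additional_space out) := by unfold Spec_fixed_length_list; infer_instance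

-- ===== CLAIM (what is proved, stated in full; the proofs are below) =====
def Claim_equal_fixed_length_list : Prop := ∀ (list_strings : List String) (l : Int) (additional_space : Int), Dom_fixed_length_list list_strings l additional_space → Spec_fixed_length_list list_strings l additional_space (fixed_length_list list_strings l additional_space)

-- ===== LEMMAS AND PROOFS =====

-- a string short enough exits A's while loop immediately
theorem pvAWhile_short (l : Int) (idx : Nat) (pre : List Char) (f : Nat) (tmp : List Char)
    (h : (tmp.length : Int) ≤ l) : pvAWhile l idx pre f tmp = [tmp] := by
  cases f with
  | zero => rfl
  | succ f => simp [pvAWhile, not_lt.mpr h]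

-- first row: A's take/drop loop = B's pointer loop
theorem pvFirst_eq (l : Int) (pre row : List Char) (hl : 1 ≤ l) :
    ∀ (f g j : Nat), row.length ≤ f + j → row.length ≤ g + j →
      pvAWhile l 0 pre f (row.drop j) = pvBFirst l row g (j : Int) := by
  intro f
  induction f with
  | zero =>
    intro g j hf hg
    have hdrop : row.drop j = [] := List.drop_eq_nil_of_le (by omega)
    cases g with
    | zero => simp [pvAWhile, pvBFirst, PySem.List.slice_from_natCast, hdrop]
    | succ g =>
      have hc : ¬ l < (row.length : Int) - (j : Int) := by omega
      simp [pvAWhile, pvBFirst, hc, PySem.List.slice_from_natCast, hdrop]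
  | succ f ih =>
    intro g j hf hg
    have hiff : (l < ((row.drop j).length : Int)) ↔ (l < (row.length : Int) - (j : Int)) := by
      rw [List.length_drop]; omega
    by_cases hc : l < (row.length : Int) - (j : Int)
    · have hcA : l < ((row.drop j).length : Int) := hiff.mpr hc
      cases g with
      | zero => exfalso; omega
      | succ g =>
        rw [pvAWhile, pvBFirst, if_pos hcA, if_pos hc]
        have hchunk : PySem.List.slice (row.drop j) none (some l) =
            PySem.List.slice row (some (j : Int)) (some ((j : Int) + l)) := by
          rw [PySem.List.slice_to _ (by omega), PySem.List.slice_toNat _ (by omega) (by omega)]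
          simp only [Int.toNat_natCast]
          congr 1; omega
        have hjcast : ((j : Int) + l) = (((j + l.toNat : Nat) : Int)) := by push_cast; omega
        have htail : (if 0 < 0 then pre ++ PySem.List.slice (row.drop j) (some l) none
            else PySem.List.slice (row.drop j) (some l) none) = row.drop (j + l.toNat) := by
          rw [if_neg (by omega), PySem.List.slice_from _ (by omega)]
          simp [List.drop_drop]
        rw [htail, hchunk, hjcast, ih g (j + l.toNat) (by omega) (by omega)]
    · have hcA : ¬ l < ((row.drop j).length : Int) := fun h => hc (hiff.mp h)
      have hdrop : PySem.List.slice row (some (j : Int)) none = row.drop j :=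
        PySem.List.slice_from_natCast ..
      cases g with
      | zero =>
        simp [pvAWhile, pvBFirst, hdrop]
        intro h; exfalso; omega
      | succ g =>
        simp [pvAWhile, pvBFirst, hc, hdrop]
        intro h; exfalso; omega

-- later rows: A's prefix-prepending loop = B's pointer loop
theorem pvRest_eq (l p : Int) (idx : Nat) (pre row : List Char)
    (hp0 : 0 ≤ p) (hpl : p + 1 ≤ l) (hpre : pre.length = p.toNat) (hidx : 0 < idx) :
    ∀ (f g j : Nat), row.length ≤ f + j → row.length ≤ g + j →
      pvAWhile l idx pre f (pre ++ row.drop j) = pvBRest l p pre row g (j : Int) := by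
  have hcast : ((p.toNat : Int)) = p := Int.toNat_of_nonneg hp0
  intro f
  induction f with
  | zero =>
    intro g j hf hg
    have hdrop : row.drop j = [] := List.drop_eq_nil_of_le (by omega)
    cases g with
    | zero => simp [pvAWhile, pvBRest, PySem.List.slice_from_natCast, hdrop]
    | succ g =>
      have hc : ¬ l < p + ((row.length : Int) - (j : Int)) := by omega
      simp [pvAWhile, pvBRest, hc, PySem.List.slice_from_natCast, hdrop]
  | succ f ih =>
    intro g j hf hg
    have hiff : (l < ((pre ++ row.drop j).length : Int)) ↔
        (l < p + ((row.length : Int) - (j : Int))) := by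
      rw [List.length_append, List.length_drop, hpre]; omega
    by_cases hc : l < p + ((row.length : Int) - (j : Int))
    · have hcA : l < ((pre ++ row.drop j).length : Int) := hiff.mpr hc
      cases g with
      | zero => exfalso; omega
      | succ g =>
        rw [pvAWhile, pvBRest, if_pos hcA, if_pos hc]
        have hchunk : PySem.List.slice (pre ++ row.drop j) none (some l) =
            pre ++ PySem.List.slice row (some (j : Int)) (some ((j : Int) + (l - p))) := by
          rw [PySem.List.slice_to _ (by omega), PySem.List.slice_toNat _ (by omega) (by omega),
            List.take_append, List.take_of_length_le (by omega)]
          simp only [Int.toNat_natCast]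
          congr 2
          omega
        have hjcast : ((j : Int) + (l - p)) = (((j + (l.toNat - p.toNat) : Nat) : Int)) := by
          push_cast; omega
        have htail : (if 0 < idx then pre ++ PySem.List.slice (pre ++ row.drop j) (some l) none
            else PySem.List.slice (pre ++ row.drop j) (some l) none) =
            pre ++ row.drop (j + (l.toNat - p.toNat)) := by
          rw [if_pos hidx, PySem.List.slice_from _ (by omega),
            List.drop_append, List.drop_eq_nil_of_le (by omega)]
          simp [List.drop_drop]
          congr 1
          omega
        rw [htail, hchunk, hjcast, ih g (j + (l.toNat - p.toNat)) (by omega) (by omega)]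
    · have hcA : ¬ l < ((pre ++ row.drop j).length : Int) := fun h => hc (hiff.mp h)
      have hdrop : PySem.List.slice row (some (j : Int)) none = row.drop j :=
        PySem.List.slice_from_natCast ..
      cases g with
      | zero =>
        simp [pvAWhile, pvBRest, hdrop]
        intro h; exfalso; omega
      | succ g =>
        simp [pvAWhile, pvBRest, hc, hdrop]
        intro h; exfalso; omega

theorem pvGo_eq (l additional_space : Int) :
    ∀ (xs : List String) (idx : Nat),
      pvAGo l additional_space idx xs = pvBGo l additional_space idx xs := by
  intro xs
  induction xs with
  | nil => intro idx; rfl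
  | cons row rest ih =>
    intro idx
    simp only [pvAGo, pvBGo]
    generalize (row.toList.length : Int) - ((PySem.Chars.lstrip row.toList).length : Int) = ws
    have h1 : ((List.replicate (ws + additional_space).toNat ' ').length : Int)
        = max (ws + additional_space) 0 := by
      simp [Int.ofNat_toNat]
    rw [h1]
    by_cases hg : l - 20 ≤ max (ws + additional_space) 0
    · rw [if_pos hg, if_pos hg]
    · rw [if_neg hg, if_neg hg]
      have hl21 : 21 ≤ l := by
        have := le_max_right (ws + additional_space) (0 : Int)
        omega
      have hl' : ((l.toNat : Nat) : Int) = l := Int.toNat_of_nonneg (by omega)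
      by_cases hshort : (row.toList.length : Int) ≤ l
      · rw [if_pos hshort, pvAWhile_short _ _ _ _ _ hshort]
        simp [ih, String.ofList_toList]
      · rw [if_neg hshort]
        obtain ⟨f, hf⟩ : ∃ f, row.toList.length = f + 1 := ⟨row.toList.length - 1, by omega⟩
        conv_lhs => rw [hf]
        rw [pvAWhile, if_pos (by omega)]
        simp only [List.map_cons, List.cons_append, ih]
        congr 2
        by_cases hidx : idx = 0
        · subst hidx
          rw [if_pos rfl, if_neg (by omega), PySem.List.slice_from _ (by omega)]
          have := pvFirst_eq l (List.replicate (ws + additional_space).toNat ' ') row.toList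
            (by omega) f row.toList.length l.toNat (by omega) (by omega)
          rw [hl'] at this
          rw [this]
        · rw [if_neg hidx, if_pos (Nat.pos_of_ne_zero hidx), PySem.List.slice_from _ (by omega)]
          have hpmax : max (ws + additional_space) 0 = (((ws + additional_space).toNat : Nat) : Int) :=
            (Int.ofNat_toNat _).symm
          have hpnat : (max (ws + additional_space) 0).toNat = (ws + additional_space).toNat := by
            rw [hpmax, Int.toNat_natCast]
          have := pvRest_eq l (max (ws + additional_space) 0) idx
            (List.replicate (ws + additional_space).toNat ' ') row.toList
            (le_max_right _ _) (by omega) (by simp [hpnat]) (Nat.pos_of_ne_zero hidx)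
            f row.toList.length l.toNat (by omega) (by omega)
          rw [hl'] at this
          rw [this, hpnat]

-- ===== VERDICT (by name: the statement is the Claim_ definition above) =====
theorem fixed_length_list_spec : Claim_equal_fixed_length_list := by
  intro ls l a _
  unfold Spec_fixed_length_list fixed_length_list fixed_length_list_alt
  exact pvGo_eq l a ls 0
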